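-- pv_equiv track=rewrite | github.com/Sallyrideauto/codetree-TILs | 240731/독서실의 거리두기 3/study-cafe-keeping-distance-3.py | get_minDist
-- ===== SOURCE A (Python) =====
-- def get_minDist(arr):
--     cnt = 0
--     r = []
--
--     for j in range(len(arr)):
--         if arr[j] == 1:
--             r.append(cnt)
--             cnt = 0
--         cnt += 1
--
--     return min(r[1::])
-- ===== SOURCE B (Python) =====
-- def get_minDist(arr):
--     positions = [i for i, x in enumerate(arr) if x == 1]
--     return min(b - a for a, b in zip(positions, positions[1:]))
-- ===== Notes on version B (the rewrite author's own statement) =====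
-- stated objective: idiomatic
-- what changed: Instead of a counter-resetting scan that accumulates gap lengths, B collects the indices of the 1s with enumerate and takes the minimum of consecutive index differences via zip.
import Mathlib
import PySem

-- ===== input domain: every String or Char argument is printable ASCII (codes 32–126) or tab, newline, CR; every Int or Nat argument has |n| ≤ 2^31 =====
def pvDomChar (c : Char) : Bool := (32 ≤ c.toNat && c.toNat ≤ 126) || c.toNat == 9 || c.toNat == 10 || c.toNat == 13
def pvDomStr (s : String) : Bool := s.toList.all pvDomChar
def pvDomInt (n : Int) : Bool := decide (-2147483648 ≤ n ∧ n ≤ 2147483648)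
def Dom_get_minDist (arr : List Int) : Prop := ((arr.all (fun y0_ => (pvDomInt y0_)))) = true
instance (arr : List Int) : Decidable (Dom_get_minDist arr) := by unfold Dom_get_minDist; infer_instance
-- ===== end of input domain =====

-- B replaces A's counter-resetting gap accumulator by collecting the indices of the 1s
-- and taking the minimum of consecutive index differences (idiomatic; same cost).

-- ===== PORT A =====
-- for j in range(len(arr)): if arr[j] == 1: r.append(cnt); cnt = 0 ;; cnt += 1
-- state = (cnt, r); arr[j] ported with pyGetD (j is always in range here)
def get_minDist (arr : List Int) : Int :=
  let st := (PySem.List.pyRange 0 (arr.length : Int) 1).foldl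
    (fun (st : Int × List Int) j =>
      let st' := if PySem.List.pyGetD arr j 0 == 1 then (0, st.2 ++ [st.1]) else st
      (st'.1 + 1, st'.2)) (0, [])
  -- min(r[1::]); min of an empty list raises ValueError in Python: Pre_ excludes that case
  (PySem.List.min? (PySem.List.slice st.2 (some 1) none) (fun x => x)).getD 0

-- ===== PORT B =====
-- positions = [i for i, x in enumerate(arr) if x == 1]
-- return min(b - a for a, b in zip(positions, positions[1:]))
def get_minDist_alt (arr : List Int) : Int :=
  let positions := ((PySem.List.enumerate arr 0).filter (fun p => p.2 == 1)).map (fun p => p.1)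
  -- min of an empty generator raises ValueError in Python: Pre_ excludes that case
  (PySem.List.min? ((positions.zip (PySem.List.slice positions (some 1) none)).map
      (fun p => p.2 - p.1)) (fun x => x)).getD 0

-- ===== PRECONDITION & SPEC =====
-- Pre_ excludes exactly the inputs with fewer than two 1s, on which Python A (and B) raise ValueError.
def Pre_get_minDist (arr : List Int) : Prop := 2 ≤ arr.count 1
instance (arr : List Int) : Decidable (Pre_get_minDist arr) := by unfold Pre_get_minDist; infer_instance
def pvWitness_get_minDist : List Int := [1, 0, 0, 1, 1]
def Spec_get_minDist (arr : List Int) (out : Int) : Prop := out = get_minDist_alt arr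
instance (arr : List Int) (out : Int) : Decidable (Spec_get_minDist arr out) := by unfold Spec_get_minDist; infer_instance

-- ===== CLAIM (what is proved, stated in full; the proofs are below) =====
def Claim_equal_get_minDist : Prop := ∀ (arr : List Int), Dom_get_minDist arr → Pre_get_minDist arr → Spec_get_minDist arr (get_minDist arr)

-- ===== LEMMAS AND PROOFS =====

-- gaps c arr: the list A's loop appends (c = current counter value)
def gaps (c : Int) : List Int → List Int
  | [] => []
  | x :: xs => if x = 1 then c :: gaps 1 xs else gaps (c + 1) xs

-- positions of the 1s, starting index i
def onePos (i : Int) : List Int → List Int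
  | [] => []
  | x :: xs => if x = 1 then i :: onePos (i + 1) xs else onePos (i + 1) xs

-- consecutive differences, with a virtual previous element
def dlist (prev : Int) : List Int → List Int
  | [] => []
  | q :: qs => (q - prev) :: dlist q qs

theorem foldA_eq_gaps (arr : List Int) (c : Int) (r : List Int) :
    (arr.foldl (fun (st : Int × List Int) x =>
        let st' := if x == 1 then (0, st.2 ++ [st.1]) else st
        (st'.1 + 1, st'.2)) (c, r)).2 = r ++ gaps c arr := by
  induction arr generalizing c r with
  | nil => simp [gaps]
  | cons x xs ih =>
    rw [List.foldl_cons]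
    by_cases hx : x = 1
    · simp only [hx, beq_self_eq_true, if_true]
      rw [ih]
      simp [gaps]
    · simp only [beq_iff_eq, if_neg hx]
      simp only [beq_iff_eq] at ih
      rw [ih]
      simp [gaps, hx]

theorem gaps_eq_dlist (arr : List Int) (i c : Int) :
    gaps c arr = dlist (i - c) (onePos i arr) := by
  induction arr generalizing i c with
  | nil => simp [gaps, onePos, dlist]
  | cons x xs ih =>
    by_cases hx : x = 1
    · simp only [gaps, onePos, hx, if_pos, dlist]
      have hc : i - (i - c) = c := by ring
      rw [hc]
      congr 1
      have := ih (i + 1) 1; simpa using this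
    · simp only [gaps, onePos, hx, if_neg, not_false_iff]
      have := ih (i + 1) (c + 1)
      simpa [show i + 1 - (c + 1) = i - c by ring] using this

theorem dlist_eq_zipdiff (qs : List Int) (q : Int) :
    dlist q qs = ((q :: qs).zip qs).map (fun p => p.2 - p.1) := by
  induction qs generalizing q with
  | nil => simp [dlist]
  | cons a as ih => simp [dlist, ih a]

theorem onePos_eq_filter_enumerate (arr : List Int) (i : Int) :
    onePos i arr = ((PySem.List.enumerate arr i).filter (fun p => p.2 == 1)).map (fun p => p.1) := by
  induction arr generalizing i with
  | nil => simp [onePos, PySem.List.enumerate_nil]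
  | cons x xs ih =>
    by_cases hx : x = 1 <;>
      simp [onePos, PySem.List.enumerate_cons, hx, ih (i + 1)]

-- the lists the two ports take the min of are equal
theorem key (arr : List Int) :
    PySem.List.slice
      ((arr.foldl (fun (st : Int × List Int) x =>
          let st' := if x == 1 then (0, st.2 ++ [st.1]) else st
          (st'.1 + 1, st'.2)) ((0 : Int), ([] : List Int))).2) (some 1) none
    = (let positions := ((PySem.List.enumerate arr 0).filter (fun p => p.2 == 1)).map (fun p => p.1)
       (positions.zip (PySem.List.slice positions (some 1) none)).map (fun p => p.2 - p.1)) := by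
  rw [foldA_eq_gaps arr 0 []]
  rw [gaps_eq_dlist arr 0 0]
  rw [← onePos_eq_filter_enumerate arr 0]
  simp only [List.nil_append, PySem.List.slice_from_one]
  cases h : onePos 0 arr with
  | nil => simp [dlist]
  | cons q qs =>
    simp only [dlist, List.tail_cons, Int.sub_zero]
    rw [dlist_eq_zipdiff qs q]

theorem get_minDist_spec : Claim_equal_get_minDist := by
  intro arr _ _
  unfold Spec_get_minDist get_minDist get_minDist_alt
  simp only []
  rw [show (PySem.List.pyRange 0 (arr.length : Int) 1).foldl
      (fun (st : Int × List Int) j =>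
        let st' := if PySem.List.pyGetD arr j 0 == 1 then (0, st.2 ++ [st.1]) else st
        (st'.1 + 1, st'.2)) ((0 : Int), ([] : List Int))
    = arr.foldl (fun (st : Int × List Int) x =>
        let st' := if x == 1 then (0, st.2 ++ [st.1]) else st
        (st'.1 + 1, st'.2)) ((0 : Int), ([] : List Int)) from by
      have := PySem.List.foldl_pyRange_pyGetD (xs := arr) (a := 0)
        (f := fun (st : Int × List Int) x =>
          let st' := if x == 1 then (0, st.2 ++ [st.1]) else st
          (st'.1 + 1, st'.2)) (init := ((0 : Int), ([] : List Int))) (d := 0) (by norm_num)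
      simpa using this]
  rw [key arr]
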